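-- pv_equiv track=rewrite | github.com/navetech/work | first-625-words/mysite/first625words/views-v1.py | calc_list_images_and_languages_counting
-- ===== SOURCE A (Python) =====
-- def calc_list_images_and_languages_counting(data_list):
--     counting = {}
--     counting['images'] = []
--     counting['languages'] = []
--
--     images_count_max = 0
--     languages_count_max = 0
--
--     for data in data_list:
--         data_counting = data['counting']
--
--         images_count = len(data_counting['images'])
--         if images_count > images_count_max:
--             images_count_max = images_count
--
--             counting['images'] = data_counting['images']
--
--         languages_count = len(data_counting['languages'])
--         if languages_count > languages_count_max:
--             languages_count_max = languages_count
--
--             counting['languages'] = data_counting['languages']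
--
--     return counting
-- ===== SOURCE B (Python) =====
-- def calc_list_images_and_languages_counting(data_list):
--     counting = {'images': [], 'languages': []}
--     for key in ('images', 'languages'):
--         ranked = sorted((d['counting'][key] for d in data_list),
--                         key=len, reverse=True)
--         if ranked:
--             counting[key] = ranked[0]
--     return counting
-- ===== Notes on version B (the rewrite author's own statement) =====
-- stated objective: alternative
-- what changed: Replaced A's fused single-pass loop threading a dict and two running count-maxima with, per key, a stable descending sort of the candidate lists by length followed by picking the first element (Python's stable reverse sort keeps the first maximal-length list first, matching A's strict-> tie-breaking).
import Mathlib
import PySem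

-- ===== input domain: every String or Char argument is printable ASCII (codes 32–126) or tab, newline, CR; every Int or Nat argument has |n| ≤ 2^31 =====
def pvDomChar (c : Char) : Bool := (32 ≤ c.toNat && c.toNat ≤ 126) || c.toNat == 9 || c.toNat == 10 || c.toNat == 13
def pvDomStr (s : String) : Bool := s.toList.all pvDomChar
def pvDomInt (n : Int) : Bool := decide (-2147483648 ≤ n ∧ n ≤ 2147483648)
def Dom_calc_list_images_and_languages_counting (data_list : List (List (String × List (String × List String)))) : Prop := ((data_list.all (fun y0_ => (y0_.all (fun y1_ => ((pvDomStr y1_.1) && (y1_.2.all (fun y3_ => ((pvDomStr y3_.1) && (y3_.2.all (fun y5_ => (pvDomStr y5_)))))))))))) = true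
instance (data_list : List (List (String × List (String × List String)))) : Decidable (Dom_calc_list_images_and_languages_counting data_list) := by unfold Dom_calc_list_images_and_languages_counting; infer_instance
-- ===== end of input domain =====

-- ===== PORT A =====
-- B replaces A's fused single-pass running-max loop by, per key, a stable descending
-- sort by length followed by picking the head; return values only (no observable mutation).
-- first-match dict lookup; outside Pre_ (missing key, Python KeyError) it defaults to []
def pvGet (d : List (String × List String)) (k : String) : List String :=
  (d.lookup k).getD []

def pvGetDC (data : List (String × List (String × List String))) : List (String × List String) :=
  (data.lookup "counting").getD []

def calc_list_images_and_languages_counting (data_list : List (List (String × List (String × List String)))) : List (String × List String) :=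
  let counting : PySem.Dict String (List String) := PySem.Dict.empty
  let counting := counting.insert "images" []
  let counting := counting.insert "languages" []
  let st := data_list.foldl
    (fun (st : PySem.Dict String (List String) × Int × Int) data =>
      let (counting, images_count_max, languages_count_max) := st
      let data_counting := pvGetDC data
      let images := pvGet data_counting "images"
      let images_count : Int := images.length
      let (counting, images_count_max) :=
        if images_count_max < images_count then (counting.insert "images" images, images_count)
        else (counting, images_count_max)
      let languages := pvGet data_counting "languages"
      let languages_count : Int := languages.length
      let (counting, languages_count_max) :=
        if languages_count_max < languages_count then (counting.insert "languages" languages, languages_count)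
        else (counting, languages_count_max)
      (counting, images_count_max, languages_count_max))
    (counting, 0, 0)
  st.1.items

-- ===== PORT B =====
-- ranked = sorted(lists, key=len, reverse=True); ranked[0] if ranked else the initial []
def pvBest (lists : List (List String)) : List String :=
  match PySem.List.sorted lists (fun l => (l.length : Int)) true with
  | [] => []
  | m :: _ => m

def calc_list_images_and_languages_counting_alt (data_list : List (List (String × List (String × List String)))) : List (String × List String) :=
  [("images", pvBest (data_list.map (fun d => pvGet (pvGetDC d) "images"))),
   ("languages", pvBest (data_list.map (fun d => pvGet (pvGetDC d) "languages")))]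

-- ===== PRECONDITION & SPEC =====
-- true iff all three dict accesses of A succeed for this entry
def pvKeysOk (data : List (String × List (String × List String))) : Bool :=
  match data.lookup "counting" with
  | none => false
  | some dc => (dc.lookup "images").isSome && (dc.lookup "languages").isSome

-- Pre_ excludes exactly the inputs on which A raises KeyError (an entry without a 'counting' key, or whose counting dict lacks 'images' or 'languages')
def Pre_calc_list_images_and_languages_counting (data_list : List (List (String × List (String × List String)))) : Prop :=
  ∀ data ∈ data_list, pvKeysOk data = true
instance (data_list : List (List (String × List (String × List String)))) : Decidable (Pre_calc_list_images_and_languages_counting data_list) := by unfold Pre_calc_list_images_and_languages_counting; infer_instance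

def pvWitness_calc_list_images_and_languages_counting : (List (List (String × List (String × List String)))) :=
  [[("counting", [("images", ["a"]), ("languages", ["en", "fr"])])],
   [("counting", [("images", ["a", "b"]), ("languages", [])])]]

def Spec_calc_list_images_and_languages_counting (data_list : List (List (String × List (String × List String)))) (out : List (String × List String)) : Prop := out = calc_list_images_and_languages_counting_alt data_list
instance (data_list : List (List (String × List (String × List String)))) (out : List (String × List String)) : Decidable (Spec_calc_list_images_and_languages_counting data_list out) := by unfold Spec_calc_list_images_and_languages_counting; infer_instance

-- ===== CLAIM (what is proved, stated in full; the proofs are below) =====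
def Claim_equal_calc_list_images_and_languages_counting : Prop := ∀ (data_list : List (List (String × List (String × List String)))), Dom_calc_list_images_and_languages_counting data_list → Pre_calc_list_images_and_languages_counting data_list → Spec_calc_list_images_and_languages_counting data_list (calc_list_images_and_languages_counting data_list)

-- ===== LEMMAS AND PROOFS =====

-- the strict-improvement step A's loop performs for one key
def pvStep (acc x : List String) : List String :=
  if (acc.length : Int) < (x.length : Int) then x else acc

lemma pvStep_nil (x : List String) : pvStep [] x = x := by
  unfold pvStep
  split
  · rfl
  · rename_i h
    simp only [List.length_nil, Nat.cast_zero] at h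
    have hx : x.length = 0 := by omega
    simp [List.length_eq_zero_iff.mp hx]

-- the head of the insertion-sort accumulator evolves exactly by pvStep
lemma foldl_insertBy_head (xs : List (List String)) (h : List String) (t : List (List String)) :
    ∃ t', xs.foldl
        (fun acc x => PySem.List.insertBy
          (fun a b => decide ((b.length : Int) < (a.length : Int))) x acc) (h :: t)
      = (xs.foldl pvStep h) :: t' := by
  induction xs generalizing h t with
  | nil => exact ⟨t, rfl⟩
  | cons x xs ih =>
    simp only [List.foldl]
    by_cases hc : (h.length : Int) < (x.length : Int)
    · have : PySem.List.insertBy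
          (fun a b => decide ((b.length : Int) < (a.length : Int))) x (h :: t)
          = x :: h :: t := by
        simp [PySem.List.insertBy, hc]
      rw [this, show pvStep h x = x from by simp [pvStep, hc]]
      exact ih x (h :: t)
    · have : PySem.List.insertBy
          (fun a b => decide ((b.length : Int) < (a.length : Int))) x (h :: t)
          = h :: PySem.List.insertBy
              (fun a b => decide ((b.length : Int) < (a.length : Int))) x t := by
        simp [PySem.List.insertBy, hc]
      rw [this, show pvStep h x = h from by simp [pvStep, hc]]
      exact ih h _

-- sort-then-pick computes A's running strict max
lemma pvBest_eq_foldl (xs : List (List String)) :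
    pvBest xs = xs.foldl pvStep [] := by
  cases xs with
  | nil => rfl
  | cons a t =>
    unfold pvBest
    rw [PySem.List.sorted_rev_eq_foldl_insertBy]
    simp only [List.foldl]
    have h1 : PySem.List.insertBy
        (fun a_1 b => decide ((b.length : Int) < (a_1.length : Int))) a [] = [a] := by
      simp [PySem.List.insertBy]
    rw [h1]
    obtain ⟨t', ht'⟩ := foldl_insertBy_head t a []
    rw [ht', pvStep_nil]

-- A's loop, characterised: the dict keeps shape [images, languages] and the
-- counters always equal the lengths of the kept lists.
lemma loopA_char (l : List (List (String × List (String × List String))))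
    (ci cl : List String) :
    l.foldl
      (fun (st : PySem.Dict String (List String) × Int × Int) data =>
        let (counting, images_count_max, languages_count_max) := st
        let data_counting := pvGetDC data
        let images := pvGet data_counting "images"
        let images_count : Int := images.length
        let (counting, images_count_max) :=
          if images_count_max < images_count then (counting.insert "images" images, images_count)
          else (counting, images_count_max)
        let languages := pvGet data_counting "languages"
        let languages_count : Int := languages.length
        let (counting, languages_count_max) :=
          if languages_count_max < languages_count then (counting.insert "languages" languages, languages_count)
          else (counting, languages_count_max)
        (counting, images_count_max, languages_count_max))
      (PySem.Dict.mk [("images", ci), ("languages", cl)], (ci.length : Int), (cl.length : Int))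
    = (PySem.Dict.mk
        [("images", (l.map (fun d => pvGet (pvGetDC d) "images")).foldl pvStep ci),
         ("languages", (l.map (fun d => pvGet (pvGetDC d) "languages")).foldl pvStep cl)],
       (((l.map (fun d => pvGet (pvGetDC d) "images")).foldl pvStep ci).length : Int),
       (((l.map (fun d => pvGet (pvGetDC d) "languages")).foldl pvStep cl).length : Int)) := by
  induction l generalizing ci cl with
  | nil => rfl
  | cons d t ih =>
    simp only [List.foldl, List.map]
    by_cases h1 : (ci.length : Int) < ((pvGet (pvGetDC d) "images").length : Int) <;>
      by_cases h2 : (cl.length : Int) < ((pvGet (pvGetDC d) "languages").length : Int) <;>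
        simpa [h1, h2, pvStep, PySem.Dict.insert] using
          ih (pvStep ci (pvGet (pvGetDC d) "images")) (pvStep cl (pvGet (pvGetDC d) "languages"))

-- ===== VERDICT (by name: the statement is the Claim_ definition above) =====
theorem calc_list_images_and_languages_counting_spec : Claim_equal_calc_list_images_and_languages_counting := by
  intro data_list _ _
  show calc_list_images_and_languages_counting data_list = calc_list_images_and_languages_counting_alt data_list
  unfold calc_list_images_and_languages_counting calc_list_images_and_languages_counting_alt
  have h0 : ((PySem.Dict.empty.insert "images" ([] : List String)).insert "languages" [])
      = PySem.Dict.mk [("images", []), ("languages", [])] := by rfl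
  simp only [h0]
  rw [show ((0 : Int), (0 : Int)) = ((([] : List String).length : Int), (([] : List String).length : Int)) from rfl]
  rw [loopA_char data_list [] []]
  simp [pvBest_eq_foldl]
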